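-- pv_equiv track=rewrite | github.com/zayneamason/LunaEngineBetaV2.0 | Tools/MemoryMatrix_SandBox/mcp_server/ingester/committer.py | _classify_era
-- ===== SOURCE A (Python) =====
-- def _classify_era(date_str: str) -> str:
--     """Classify conversation era from date."""
--     ERAS = {
--         "PRE_LUNA": ("2023-01-01", "2024-06-01"),
--         "PROTO_LUNA": ("2024-06-01", "2025-01-01"),
--         "LUNA_DEV": ("2025-01-01", "2025-10-01"),
--         "LUNA_LIVE": ("2025-10-01", "2030-01-01"),
--     }
--
--     date = date_str[:10]  # YYYY-MM-DD
--
--     for era, (start, end) in ERAS.items():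
--         if start <= date < end:
--             return era
--
--     return "LUNA_LIVE"
-- ===== SOURCE B (Python) =====
-- # Binary search over sorted era start-boundaries instead of a linear range scan.
-- _CUTS = ("2023-01-01", "2024-06-01", "2025-01-01", "2025-10-01")
-- _LABELS = ("LUNA_LIVE", "PRE_LUNA", "PROTO_LUNA", "LUNA_DEV", "LUNA_LIVE")
--
--
-- def _classify_era(date_str: str) -> str:
--     """Classify conversation era from date."""
--     date = date_str[:10]  # YYYY-MM-DD
--     # hand-rolled bisect_right over the sorted cut points
--     lo, hi = 0, len(_CUTS)
--     while lo < hi: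
--         mid = (lo + hi) // 2
--         if date < _CUTS[mid]:
--             hi = mid
--         else:
--             lo = mid + 1
--     return _LABELS[lo]
-- ===== Notes on version B (the rewrite author's own statement) =====
-- stated objective: alternative
-- what changed: Replaces the linear scan over era (start, end) range pairs with a hand-rolled bisect_right binary search over the sorted list of era start boundaries plus a 5-entry label table (the sentinel LUNA_LIVE entries at both ends reproduce the pre-2023 and post-2025-10 fallthrough).
import Mathlib
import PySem

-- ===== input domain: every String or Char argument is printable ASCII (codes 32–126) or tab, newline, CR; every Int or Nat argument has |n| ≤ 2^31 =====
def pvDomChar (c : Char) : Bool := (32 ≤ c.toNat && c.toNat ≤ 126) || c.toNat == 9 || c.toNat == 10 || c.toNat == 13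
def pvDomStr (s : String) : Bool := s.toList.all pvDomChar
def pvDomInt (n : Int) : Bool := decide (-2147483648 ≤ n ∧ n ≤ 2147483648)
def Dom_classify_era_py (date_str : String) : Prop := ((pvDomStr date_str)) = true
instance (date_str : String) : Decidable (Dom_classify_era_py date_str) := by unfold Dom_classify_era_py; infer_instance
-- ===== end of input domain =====

-- B replaces A's linear scan over era (start, end) ranges by a hand-rolled
-- bisect_right binary search over the sorted cut points (objective: alternative/idiomatic).

-- ===== PORT A =====
-- A iterates over the ERAS dict in insertion order; ported as the corresponding if-chain.
def classify_era_py (date_str : String) : String :=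
  let date := PySem.Str.slice date_str none (some 10)
  if "2023-01-01" ≤ date ∧ date < "2024-06-01" then "PRE_LUNA"
  else if "2024-06-01" ≤ date ∧ date < "2025-01-01" then "PROTO_LUNA"
  else if "2025-01-01" ≤ date ∧ date < "2025-10-01" then "LUNA_DEV"
  else if "2025-10-01" ≤ date ∧ date < "2030-01-01" then "LUNA_LIVE"
  else "LUNA_LIVE"

-- ===== PORT B =====
def pvCuts : List String := ["2023-01-01", "2024-06-01", "2025-01-01", "2025-10-01"]
def pvLabels : List String := ["LUNA_LIVE", "PRE_LUNA", "PROTO_LUNA", "LUNA_DEV", "LUNA_LIVE"]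

-- the 'while lo < hi' bisect_right loop of Source B
def pvBsLoop (date : String) (lo hi : Nat) : Nat :=
  if lo < hi then
    let mid := (lo + hi) / 2
    if date < pvCuts.getD mid "" then pvBsLoop date lo mid
    else pvBsLoop date (mid + 1) hi
  else lo
termination_by hi - lo
decreasing_by all_goals omega

def classify_era_py_alt (date_str : String) : String :=
  let date := PySem.Str.slice date_str none (some 10)
  pvLabels.getD (pvBsLoop date 0 pvCuts.length) ""

-- ===== PRECONDITION & SPEC =====
def Spec_classify_era_py (date_str : String) (out : String) : Prop := out = classify_era_py_alt date_str
instance (date_str : String) (out : String) : Decidable (Spec_classify_era_py date_str out) := by unfold Spec_classify_era_py; infer_instance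

-- ===== CLAIM (what is proved, stated in full; the proofs are below) =====
def Claim_equal_classify_era_py : Prop := ∀ (date_str : String), Dom_classify_era_py date_str → Spec_classify_era_py date_str (classify_era_py date_str)

-- ===== LEMMAS AND PROOFS =====

-- Unfolded value of the binary-search loop on the fixed 4-element cut list,
-- following the comparison order the loop actually performs.
lemma pvBsLoop_eval (d : String) :
    pvBsLoop d 0 4 =
      if d < "2025-01-01" then
        (if d < "2024-06-01" then (if d < "2023-01-01" then 0 else 1) else 2)
      else
        (if d < "2025-10-01" then 3 else 4) := by
  by_cases h2 : d < "2025-01-01"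
  · by_cases h1 : d < "2024-06-01"
    · by_cases h0 : d < "2023-01-01" <;> simp [pvBsLoop, pvCuts, h0, h1, h2]
    · simp [pvBsLoop, pvCuts, h1, h2]
  · by_cases h3 : d < "2025-10-01" <;> simp [pvBsLoop, pvCuts, h2, h3]

lemma classify_era_core (d : String) :
    (if "2023-01-01" ≤ d ∧ d < "2024-06-01" then "PRE_LUNA"
     else if "2024-06-01" ≤ d ∧ d < "2025-01-01" then "PROTO_LUNA"
     else if "2025-01-01" ≤ d ∧ d < "2025-10-01" then "LUNA_DEV"
     else if "2025-10-01" ≤ d ∧ d < "2030-01-01" then "LUNA_LIVE"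
     else "LUNA_LIVE")
    = pvLabels.getD (pvBsLoop d 0 pvCuts.length) "" := by
  have hlen : pvCuts.length = 4 := rfl
  rw [hlen, pvBsLoop_eval]
  by_cases h0 : d < "2023-01-01"
  · have h1 : d < "2024-06-01" := h0.trans (by rw [String.lt_iff_toList_lt]; decide)
    have h2 : d < "2025-01-01" := h0.trans (by rw [String.lt_iff_toList_lt]; decide)
    have h3 : d < "2025-10-01" := h0.trans (by rw [String.lt_iff_toList_lt]; decide)
    simp [pvLabels, h0, h1, h2, h3, not_le.2 h0, not_le.2 h1, not_le.2 h2, not_le.2 h3]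
  · by_cases h1 : d < "2024-06-01"
    · have h2 : d < "2025-01-01" := h1.trans (by rw [String.lt_iff_toList_lt]; decide)
      simp [pvLabels, h0, h1, h2, not_lt.1 h0]
    · by_cases h2 : d < "2025-01-01"
      · simp [pvLabels, h1, h2, not_lt.1 h1]
      · by_cases h3 : d < "2025-10-01"
        · simp [pvLabels, h1, h2, h3, not_lt.1 h2]
        · simp [pvLabels, h1, h2, h3, not_lt.1 h3]
-- ===== VERDICT (by name: the statement is the Claim_ definition above) =====
theorem classify_era_py_spec : Claim_equal_classify_era_py := by
  intro date_str _
  unfold Spec_classify_era_py classify_era_py classify_era_py_alt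
  exact classify_era_core _
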